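-- pv_equiv track=rewrite | github.com/timzines/PDFGENERATOR | generate_pdf.py | group_blocks_into_chunks
-- ===== SOURCE A (Python) =====
-- def group_blocks_into_chunks(blocks):
--     """Group blocks into logical chunks, splitting at each subheader.
--
--     A chunk starts at a subheader (or from the beginning) and includes
--     everything up to the next subheader.  This keeps each chunk small
--     enough to fit on a single page, avoiding the monolithic-column
--     problem with WeasyPrint floats.
--     """
--     chunks = []
--     current_chunk = []
--     for block in blocks:
--         if block.get("type") == "subheader" and current_chunk:
--             chunks.append(current_chunk)
--             current_chunk = []
--         current_chunk.append(block)
--     if current_chunk: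
--         chunks.append(current_chunk)
--     return chunks
-- ===== SOURCE B (Python) =====
-- def group_blocks_into_chunks(blocks):
--     """Single reversed pass: build chunks back-to-front, starting a new chunk
--     whenever the chunk being built begins (in original order) with a subheader."""
--     rev_chunks = []
--     for block in reversed(blocks):
--         if rev_chunks and rev_chunks[-1][-1].get("type") != "subheader":
--             rev_chunks[-1].append(block)
--         else:
--             rev_chunks.append([block])
--     return [list(reversed(c)) for c in reversed(rev_chunks)]
-- ===== Notes on version B (the rewrite author's own statement) =====
-- stated objective: alternative
-- what changed: Replaces A's forward accumulation with a flushed current-chunk buffer by a single reversed pass that conses each block onto the chunk being built unless that chunk already starts with a subheader, then reverses chunks and their order once at the end.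
import Mathlib
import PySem

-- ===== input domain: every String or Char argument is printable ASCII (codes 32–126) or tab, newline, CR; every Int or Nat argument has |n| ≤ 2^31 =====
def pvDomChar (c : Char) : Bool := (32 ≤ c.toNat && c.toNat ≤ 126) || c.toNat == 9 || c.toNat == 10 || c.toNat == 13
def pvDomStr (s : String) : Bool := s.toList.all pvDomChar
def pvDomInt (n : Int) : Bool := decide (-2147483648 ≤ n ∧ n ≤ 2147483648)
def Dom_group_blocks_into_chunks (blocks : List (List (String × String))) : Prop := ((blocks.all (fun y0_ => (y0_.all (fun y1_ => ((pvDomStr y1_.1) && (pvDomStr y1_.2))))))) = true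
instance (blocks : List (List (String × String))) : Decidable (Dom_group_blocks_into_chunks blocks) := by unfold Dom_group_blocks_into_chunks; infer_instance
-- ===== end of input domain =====

-- B replaces A's forward pass with a flushed current-chunk buffer by one reversed pass that builds chunks back-to-front (objective: alternative decomposition, same cost).

-- ===== PORT A =====
-- the body of A's for-loop, as a fold step over the pair (chunks, current_chunk)
def pvAStep (st : List (List (List (String × String))) × List (List (String × String)))
    (block : List (String × String)) :
    List (List (List (String × String))) × List (List (String × String)) :=
  if (PySem.Dict.mk block).get? "type" == some "subheader" && !st.2.isEmpty then
    (st.1 ++ [st.2], [block])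
  else
    (st.1, st.2 ++ [block])

def group_blocks_into_chunks (blocks : List (List (String × String))) : List (List (List (String × String))) :=
  let st := blocks.foldl pvAStep ([], [])
  if !st.2.isEmpty then st.1 ++ [st.2] else st.1

-- ===== PORT B =====
-- the body of B's for-loop over reversed(blocks); rev_chunks[-1] / [-1] via getLast? (an empty
-- chunk never occurs, so the inner `none` case is unreachable and falls to the else branch)
def pvBStep (rev : List (List (List (String × String)))) (block : List (String × String)) :
    List (List (List (String × String))) :=
  match rev.getLast? with
  | some c =>
    if (match c.getLast? with
        | some d => (PySem.Dict.mk d).get? "type" != some "subheader"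
        | none => false) then
      rev.dropLast ++ [c ++ [block]]
    else
      rev ++ [[block]]
  | none => rev ++ [[block]]

def group_blocks_into_chunks_alt (blocks : List (List (String × String))) : List (List (List (String × String))) :=
  let rev := blocks.reverse.foldl pvBStep []
  rev.reverse.map List.reverse

-- ===== PRECONDITION & SPEC =====
def Spec_group_blocks_into_chunks (blocks : List (List (String × String))) (out : List (List (List (String × String)))) : Prop := out = group_blocks_into_chunks_alt blocks
instance (blocks : List (List (String × String))) (out : List (List (List (String × String)))) : Decidable (Spec_group_blocks_into_chunks blocks out) := by unfold Spec_group_blocks_into_chunks; infer_instance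

-- ===== CLAIM (what is proved, stated in full; the proofs are below) =====
def Claim_equal_group_blocks_into_chunks : Prop := ∀ (blocks : List (List (String × String))), Dom_group_blocks_into_chunks blocks → Spec_group_blocks_into_chunks blocks (group_blocks_into_chunks blocks)

-- ===== LEMMAS AND PROOFS =====

def pvIsSub (d : List (String × String)) : Bool :=
  (PySem.Dict.mk d).get? "type" == some "subheader"

def pvHeadSub : List (List (String × String)) → Bool
  | [] => false
  | d :: _ => pvIsSub d

-- head-oriented single step: cons b onto the chunk list built from the rest of the blocks
def pvStep1 (chunks : List (List (List (String × String)))) (b : List (String × String)) :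
    List (List (List (String × String))) :=
  match chunks with
  | [] => [[b]]
  | c :: cs => if pvHeadSub c then [b] :: c :: cs else (b :: c) :: cs

-- reference function: the chunk list of bs, by head recursion
def pvG : List (List (String × String)) → List (List (List (String × String)))
  | [] => []
  | b :: bs => pvStep1 (pvG bs) b

theorem pvG_cons (b : List (String × String)) (bs : List (List (String × String))) :
    pvG (b :: bs) = pvStep1 (pvG bs) b := rfl

-- A's tail recursion with an explicit current chunk
def pvChunkAux : List (List (String × String)) → List (List (String × String)) → List (List (List (String × String)))
  | cur, [] => [cur]
  | cur, b :: bs => if pvIsSub b then cur :: pvChunkAux [b] bs else pvChunkAux (cur ++ [b]) bs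

-- merge a nonempty prefix chunk into an already-built chunk list
def pvMerge (cur : List (List (String × String))) (chunks : List (List (List (String × String)))) :
    List (List (List (String × String))) :=
  match chunks with
  | [] => [cur]
  | c :: cs => if pvHeadSub c then cur :: c :: cs else (cur ++ c) :: cs

-- A's final flush, named for the loop lemma
def pvFinish (st : List (List (List (String × String))) × List (List (String × String))) :
    List (List (List (String × String))) :=
  if !st.2.isEmpty then st.1 ++ [st.2] else st.1

theorem pvA_eq_finish (blocks : List (List (String × String))) :
    group_blocks_into_chunks blocks = pvFinish (blocks.foldl pvAStep ([], [])) := rfl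

theorem pvAStep_eq (chunks : List (List (List (String × String))))
    (cur : List (List (String × String))) (b : List (String × String)) :
    pvAStep (chunks, cur) b
      = if pvIsSub b && !cur.isEmpty then (chunks ++ [cur], [b]) else (chunks, cur ++ [b]) := rfl

theorem pvA_loop (bs : List (List (String × String)))
    (chunks : List (List (List (String × String)))) (cur : List (List (String × String))) (h : cur ≠ []) :
    pvFinish (bs.foldl pvAStep (chunks, cur)) = chunks ++ pvChunkAux cur bs := by
  induction bs generalizing chunks cur with
  | nil => simp [pvFinish, pvChunkAux, h]
  | cons b bs ih =>
    rw [List.foldl_cons, pvAStep_eq]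
    have hcur : cur.isEmpty = false := by simp [h]
    by_cases hs : pvIsSub b
    · rw [if_pos (by simp [hs, hcur]), ih _ _ (by simp)]
      simp [pvChunkAux, hs]
    · rw [if_neg (by simp [hs]), ih _ _ (by simp)]
      simp [pvChunkAux, hs]

theorem pvA_eq_chunkAux (b : List (String × String)) (bs : List (List (String × String))) :
    group_blocks_into_chunks (b :: bs) = pvChunkAux [b] bs := by
  rw [pvA_eq_finish, List.foldl_cons, pvAStep_eq]
  rw [if_neg (by simp)]
  simpa using pvA_loop bs [] [b] (by simp)

-- shape: pvG of a nonempty list starts with a chunk headed by the first block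
theorem pvG_shape (b : List (String × String)) (bs : List (List (String × String))) :
    ∃ c cs, pvG (b :: bs) = (b :: c) :: cs := by
  induction bs generalizing b with
  | nil => exact ⟨[], [], rfl⟩
  | cons b' bs ih =>
    obtain ⟨c, cs, hc⟩ := ih b'
    by_cases hs : pvIsSub b'
    · exact ⟨[], (b' :: c) :: cs, by rw [pvG_cons, hc]; simp [pvStep1, pvHeadSub, hs]⟩
    · exact ⟨b' :: c, cs, by rw [pvG_cons, hc]; simp [pvStep1, pvHeadSub, hs]⟩

theorem pvChunkAux_eq_merge (bs : List (List (String × String))) (cur : List (List (String × String))) :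
    pvChunkAux cur bs = pvMerge cur (pvG bs) := by
  induction bs generalizing cur with
  | nil => rfl
  | cons b bs ih =>
    cases bs with
    | nil =>
      by_cases hs : pvIsSub b <;>
        simp [pvChunkAux, pvG, pvStep1, pvMerge, pvHeadSub, hs]
    | cons b' rest =>
      obtain ⟨c, cs, hc⟩ := pvG_shape b' rest
      rw [pvG_cons, hc]
      by_cases hs : pvIsSub b
      · rw [show pvChunkAux cur (b :: b' :: rest) = cur :: pvChunkAux [b] (b' :: rest) by
          simp [pvChunkAux, hs]]
        rw [ih, hc]
        by_cases hs' : pvIsSub b' <;>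
          simp [pvMerge, pvStep1, pvHeadSub, hs, hs']
      · rw [show pvChunkAux cur (b :: b' :: rest) = pvChunkAux (cur ++ [b]) (b' :: rest) by
          simp [pvChunkAux, hs]]
        rw [ih, hc]
        by_cases hs' : pvIsSub b' <;>
          simp [pvMerge, pvStep1, pvHeadSub, hs, hs']

theorem pvA_eq_pvG (blocks : List (List (String × String))) :
    group_blocks_into_chunks blocks = pvG blocks := by
  cases blocks with
  | nil => rfl
  | cons b bs =>
    rw [pvA_eq_chunkAux, pvChunkAux_eq_merge, pvG_cons]
    cases hG : pvG bs with
    | nil => rfl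
    | cons c cs => simp [pvMerge, pvStep1]

-- the reversed-orientation step agrees with pvStep1 through the double reversal,
-- provided the head chunk (if any) is nonempty
theorem pvBStep_convBack (chunks : List (List (List (String × String)))) (b : List (String × String))
    (h : chunks = [] ∨ ∃ d c cs, chunks = (d :: c) :: cs) :
    pvBStep ((chunks.map List.reverse).reverse) b = ((pvStep1 chunks b).map List.reverse).reverse := by
  rcases h with h | ⟨d, c, cs, h⟩
  · subst h; simp [pvBStep, pvStep1]
  · subst h
    have hrev : ((((d :: c) :: cs).map List.reverse).reverse)
        = ((cs.map List.reverse).reverse) ++ [(d :: c).reverse] := by simp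
    rw [hrev]
    by_cases hs : pvIsSub d
    · have hb : ((PySem.Dict.mk d).get? "type" != some "subheader") = false := by
        simpa [pvIsSub] using hs
      simp [pvBStep, pvStep1, pvHeadSub, hs, hb]
    · have hb : ((PySem.Dict.mk d).get? "type" != some "subheader") = true := by
        simpa [pvIsSub] using hs
      simp [pvBStep, pvStep1, pvHeadSub, hs, hb]

theorem pvB_fold_eq (bs : List (List (String × String))) :
    bs.reverse.foldl pvBStep [] = ((pvG bs).map List.reverse).reverse := by
  induction bs with
  | nil => rfl
  | cons b bs ih =>
    have hshape : pvG bs = [] ∨ ∃ d c cs, pvG bs = (d :: c) :: cs := by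
      cases bs with
      | nil => exact Or.inl rfl
      | cons b' rest =>
        obtain ⟨c, cs, hc⟩ := pvG_shape b' rest
        exact Or.inr ⟨b', c, cs, hc⟩
    rw [List.reverse_cons, List.foldl_append, List.foldl_cons, List.foldl_nil, ih,
      pvBStep_convBack _ _ hshape, pvG_cons]

theorem pvB_eq_pvG (blocks : List (List (String × String))) :
    group_blocks_into_chunks_alt blocks = pvG blocks := by
  show (blocks.reverse.foldl pvBStep []).reverse.map List.reverse = pvG blocks
  rw [pvB_fold_eq]
  simp [List.map_map]

-- ===== VERDICT (by name: the statement is the Claim_ definition above) =====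
theorem group_blocks_into_chunks_spec : Claim_equal_group_blocks_into_chunks := by
  intro blocks _
  unfold Spec_group_blocks_into_chunks
  rw [pvA_eq_pvG, pvB_eq_pvG]
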